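-- pv_equiv track=rewrite | github.com/mgradyn/SVD-Quantization-Task-Merging | src/svd_hybrid/clustering.py | get_cluster_members
-- ===== SOURCE A (Python) =====
-- from typing import Dict, List, Tuple
--
-- def get_cluster_members(
--     cluster_assignments: Dict[str, int]
-- ) -> Dict[int, List[str]]:
--     """
--     Get list of tasks in each cluster.
--
--     Inverts the cluster assignment dictionary to get members per cluster.
--     Useful for understanding cluster composition.
--
--     Args:
--         cluster_assignments: Dictionary mapping task_name -> cluster_id
--
--     Returns:
--         Dictionary mapping cluster_id -> list of task names in that cluster
--
--     Example:
--         >>> assignments = {'Cars': 0, 'DTD': 0, 'EuroSAT': 1}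
--         >>> members = get_cluster_members(assignments)
--         >>> members
--         {0: ['Cars', 'DTD'], 1: ['EuroSAT']}
--     """
--     clusters = {}
--     for task_name, cluster_id in cluster_assignments.items():
--         if cluster_id not in clusters:
--             clusters[cluster_id] = []
--         clusters[cluster_id].append(task_name)
--
--     return clusters
-- ===== SOURCE B (Python) =====
-- def get_cluster_members(cluster_assignments):
--     # Alternative decomposition: take the distinct cluster ids in first-appearance
--     # order, then build each member list with a filtering pass (no mutable buckets).
--     order = dict.fromkeys(cluster_assignments.values())
--     return {
--         cid: [task for task, c in cluster_assignments.items() if c == cid]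
--         for cid in order
--     }
-- ===== Notes on version B (the rewrite author's own statement) =====
-- stated objective: alternative
-- what changed: A builds the inverse mapping in one pass by mutating per-cluster bucket lists inside a dict; B instead deduplicates the cluster ids in first-appearance order and computes each cluster's member list with an independent filtering pass over the assignments.
import Mathlib
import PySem

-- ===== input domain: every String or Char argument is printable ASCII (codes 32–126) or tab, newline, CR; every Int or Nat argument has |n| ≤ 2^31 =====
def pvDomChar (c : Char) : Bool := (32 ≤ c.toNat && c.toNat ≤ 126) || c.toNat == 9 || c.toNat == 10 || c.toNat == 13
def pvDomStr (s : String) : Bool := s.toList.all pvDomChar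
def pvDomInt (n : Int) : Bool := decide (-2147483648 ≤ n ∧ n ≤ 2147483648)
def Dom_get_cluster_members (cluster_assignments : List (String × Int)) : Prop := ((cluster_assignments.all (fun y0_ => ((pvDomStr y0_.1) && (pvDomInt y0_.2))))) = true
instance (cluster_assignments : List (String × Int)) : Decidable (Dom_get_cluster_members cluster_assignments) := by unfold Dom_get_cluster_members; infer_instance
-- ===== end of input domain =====

-- B replaces A's single-pass mutable-bucket dict build with dedup-of-ids + one filtering pass
-- per cluster (alternative decomposition, same return value).


-- ===== PORT A =====
-- literal port of A: clusters = {}; for task_name, cluster_id in items: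
--   if cluster_id not in clusters: clusters[cluster_id] = []
--   clusters[cluster_id].append(task_name)
def get_cluster_members (cluster_assignments : List (String × Int)) : List (Int × List String) :=
  (cluster_assignments.foldl
    (fun (clusters : PySem.Dict Int (List String)) p =>
      let clusters := if clusters.contains p.2 then clusters else clusters.insert p.2 []
      clusters.modify p.2 [] (fun l => l ++ [p.1]))
    PySem.Dict.empty).items

-- ===== PORT B =====
-- literal port of B: distinct cluster ids in first-appearance order (dict.fromkeys),
-- then one filtering pass per cluster id.
def get_cluster_members_alt (cluster_assignments : List (String × Int)) : List (Int × List String) :=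
  (PySem.List.dedup (cluster_assignments.map (fun p => p.2))).map
    (fun cid => (cid, (cluster_assignments.filter (fun p => p.2 == cid)).map (fun p => p.1)))

-- ===== PRECONDITION & SPEC =====
def Spec_get_cluster_members (cluster_assignments : List (String × Int)) (out : List (Int × List String)) : Prop := out = get_cluster_members_alt cluster_assignments
instance (cluster_assignments : List (String × Int)) (out : List (Int × List String)) : Decidable (Spec_get_cluster_members cluster_assignments out) := by unfold Spec_get_cluster_members; infer_instance

-- ===== CLAIM (what is proved, stated in full; the proofs are below) =====
def Claim_equal_get_cluster_members : Prop := ∀ (cluster_assignments : List (String × Int)), Dom_get_cluster_members cluster_assignments → Spec_get_cluster_members cluster_assignments (get_cluster_members cluster_assignments)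

-- ===== LEMMAS AND PROOFS =====

-- A's loop body ('setdefault to [] then append') is the modify-with-default step.
theorem stepA_eq_modify (d : PySem.Dict Int (List String)) (p : String × Int) :
    (let d' := if d.contains p.2 then d else d.insert p.2 []
     d'.modify p.2 [] (fun l => l ++ [p.1]))
      = d.modify p.2 [] (fun l => l ++ [p.1]) := by
  by_cases h : d.contains p.2 = true
  · simp [h]
  · have h' : d.contains p.2 = false := by simpa using h
    simp [h', PySem.Dict.modify, PySem.Dict.getD_insert_self, PySem.Dict.insert_insert_self,
      PySem.Dict.getD_of_not_contains d [] h']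

theorem get_cluster_members_eq_alt (xs : List (String × Int)) :
    get_cluster_members xs = get_cluster_members_alt xs := by
  unfold get_cluster_members get_cluster_members_alt
  have hfold :
      xs.foldl
        (fun (clusters : PySem.Dict Int (List String)) p =>
          let clusters := if clusters.contains p.2 then clusters else clusters.insert p.2 []
          clusters.modify p.2 [] (fun l => l ++ [p.1]))
        PySem.Dict.empty
      = xs.foldl (fun d p => d.modify p.2 [] (fun l => l ++ [p.1])) PySem.Dict.empty := by
    exact PySem.List.foldl_congr_mem xs _ _ _ (fun d p _ => stepA_eq_modify d p)
  rw [hfold]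
  set D := xs.foldl (fun d p => d.modify p.2 [] (fun l => l ++ [p.1])) PySem.Dict.empty with hD
  -- keys: first-appearance dedup of the cluster ids
  have hkeys : D.keys = PySem.List.dedup (xs.map (fun p => p.2)) := by
    rw [hD, PySem.Dict.keys_foldl_modify_key xs (fun p => p.2) [] (fun _ p l => l ++ [p.1])]
    simp [PySem.Dict.keys_empty, PySem.Set.update_nil_left, PySem.List.dedup_eq_ofList]
  have hnodup : D.keys.Nodup := by
    rw [hkeys, PySem.List.dedup_eq_ofList]; exact PySem.Set.nodup_ofList _
  -- values: each key's bucket is the filtered member list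
  have hval : ∀ c : Int, D.getD c [] = (xs.filter (fun p => p.2 == c)).map (fun p => p.1) := by
    intro c
    have hswap :
        D = (xs.map Prod.swap).foldl (fun d p => d.modify p.1 [] (fun l => l ++ [p.2]))
              PySem.Dict.empty := by
      rw [hD, List.foldl_map]
      rfl
    rw [hswap, PySem.Dict.getD_foldl_modify_append]
    simp [List.filter_map, Function.comp_def, Prod.swap]
  rw [PySem.Dict.items_eq_map_keys D hnodup [], hkeys]
  exact List.map_congr_left (fun c _ => by rw [hval c])

-- ===== VERDICT (by name: the statement is the Claim_ definition above) =====
theorem get_cluster_members_spec : Claim_equal_get_cluster_members := by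
  intro xs _
  unfold Spec_get_cluster_members
  exact get_cluster_members_eq_alt xs
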